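-- pv_equiv track=rewrite | github.com/TheDukeVin/AMP | anagame/student/my_anagame.py | parse_guess
-- ===== SOURCE A (Python) =====
-- def parse_guess(guess:str) -> tuple:
--    '''Splits an entered guess into a two word tuple with all white space removed
--
--           Args:
--            guess: A single string reprsenting the player guess
--
--           Returns:
--            A tuple of two words. ("", "") in case of invalid input.
--
--           Examples
--           --------
--           >>>parse_guess("eat, tea")
--           ("eat", "tea")
--
--           >>>parse_guess("eat , tea")
--           ("eat", "tea")
--
--           >>>parse_guess("eat,tea")
--           ("eat", "tea")
--
--           >>>parse_guess("eat tea")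
--           ("", "")
--    '''
--    guess = guess.replace(" ", "")
--    commaPos = guess.find(",")
--    if commaPos == -1:
--        return ("", "")
--    for i in range(0, len(guess)):
--        if i != commaPos and not guess[i].isalpha():
--            return ("", "")
--
--    return (guess[:commaPos], guess[commaPos+1:])
-- ===== SOURCE B (Python) =====
-- def parse_guess(guess: str) -> tuple:
--     """Split-then-validate: strip spaces, split on ',', accept exactly two
--     parts whose concatenation is alphabetic; anything else yields ("", "")."""
--     s = guess.replace(" ", "")
--     parts = s.split(",")
--     if len(parts) == 2 and (parts[0] + parts[1]).isalpha():
--         return (parts[0], parts[1])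
--     return ("", "")
-- ===== Notes on version B (the rewrite author's own statement) =====
-- stated objective: idiomatic
-- what changed: Replaces the find-first-comma plus index-by-index validation loop and slicing with a single comma split followed by a length-2 check and one combined isalpha test on the concatenated parts.
import Mathlib
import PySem

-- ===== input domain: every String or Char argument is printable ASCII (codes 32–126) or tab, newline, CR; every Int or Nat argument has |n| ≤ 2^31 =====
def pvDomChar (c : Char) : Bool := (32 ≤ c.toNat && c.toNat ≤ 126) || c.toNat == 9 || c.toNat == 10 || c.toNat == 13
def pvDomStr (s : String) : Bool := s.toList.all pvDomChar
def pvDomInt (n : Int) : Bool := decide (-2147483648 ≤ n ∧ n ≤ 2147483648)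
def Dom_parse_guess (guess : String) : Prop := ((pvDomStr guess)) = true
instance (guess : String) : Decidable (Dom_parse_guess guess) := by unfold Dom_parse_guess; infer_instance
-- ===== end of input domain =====

-- B replaces A's find-comma + per-index validation loop + slices by split(',') with a
-- length-2 check and one combined isalpha on the concatenated parts (idiomatic).

-- ===== PORT A =====
-- the 'for i in range(0, len(guess))' early-return loop: false = the loop returned ("","")
def parseGuessLoopA (g : List Char) (commaPos : Int) : List Int → Bool
  | [] => true
  | i :: rest =>
    -- indices drawn from range(0, len(g)) are always in bounds, so pyGetD with any
    -- default computes exactly Python's guess[i]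
    if i ≠ commaPos ∧ ¬ (PySem.Chars.isalpha (PySem.List.pyGetD g i ' ')) then false
    else parseGuessLoopA g commaPos rest

def parse_guess (guess : String) : String × String :=
  let g := PySem.Str.replace guess " " ""
  let commaPos := PySem.Str.find g ","
  if commaPos == -1 then ("", "")
  else if parseGuessLoopA g.toList commaPos (PySem.List.pyRange 0 (PySem.Str.len g) 1) then
    (String.ofList (PySem.List.slice g.toList none (some commaPos)),
     String.ofList (PySem.List.slice g.toList (some (commaPos + 1)) none))
  else ("", "")

-- ===== PORT B =====
def parse_guess_alt (guess : String) : String × String :=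
  let s := PySem.Str.replace guess " " ""
  -- s.split(",") : the separator is non-empty, so Chars.splitOn is the exact semantics
  let parts := PySem.Chars.splitOn s.toList [',']
  if parts.length == 2 && PySem.Chars.strIsalpha (parts.getD 0 [] ++ parts.getD 1 []) then
    (String.ofList (parts.getD 0 []), String.ofList (parts.getD 1 []))
  else ("", "")

-- ===== PRECONDITION & SPEC =====
def Spec_parse_guess (guess : String) (out : String × String) : Prop := out = parse_guess_alt guess
instance (guess : String) (out : String × String) : Decidable (Spec_parse_guess guess out) := by unfold Spec_parse_guess; infer_instance

-- ===== CLAIM (what is proved, stated in full; the proofs are below) =====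
def Claim_equal_parse_guess : Prop := ∀ (guess : String), Dom_parse_guess guess → Spec_parse_guess guess (parse_guess guess)

-- ===== LEMMAS AND PROOFS =====

-- reference splitter: Python's s.split(",") written as a plain structural recursion
def pgSplit : List Char → List Char → List (List Char)
  | cur, [] => [cur]
  | cur, c :: t => if c = ',' then cur :: pgSplit [] t else pgSplit (cur ++ [c]) t

theorem pgSplit_go (l : List Char) : ∀ (fuel : Nat) (cur : List Char) (acc : List (List Char)),
    l.length ≤ fuel →
    PySem.Chars.splitOn.go [','] fuel l cur acc = acc.reverse ++ pgSplit cur.reverse l := by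
  induction l with
  | nil =>
    intro fuel cur acc _
    cases fuel <;> simp [PySem.Chars.splitOn.go, pgSplit]
  | cons c t ih =>
    intro fuel cur acc h
    cases fuel with
    | zero => simp at h
    | succ f =>
      by_cases hc : c = ','
      · subst hc
        simp only [PySem.Chars.splitOn.go, List.isPrefixOf, BEq.rfl, Bool.true_and,
          if_true, List.length_cons, List.drop_succ_cons]
        simp only [List.length_nil, List.drop_zero]
        rw [ih f [] (cur.reverse :: acc) (by simpa using h)]
        simp [pgSplit]
      · have hpre : ([','].isPrefixOf (c :: t)) = false := by
          simp [List.isPrefixOf]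
          exact fun hh => absurd hh.symm hc
        simp only [PySem.Chars.splitOn.go, hpre, if_false, Bool.false_eq_true]
        rw [ih f (c :: cur) acc (by simpa using h)]
        simp [pgSplit, hc]

theorem splitOn_eq_pgSplit (cs : List Char) :
    PySem.Chars.splitOn cs [','] = pgSplit [] cs := by
  have := pgSplit_go cs (cs.length + 1) [] [] (by omega)
  simpa [PySem.Chars.splitOn] using this

theorem pgSplit_no_comma (l : List Char) : ∀ cur, ',' ∉ l → pgSplit cur l = [cur ++ l] := by
  induction l with
  | nil => intro cur _; simp [pgSplit]
  | cons c t ih =>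
    intro cur h
    have hc : c ≠ ',' := fun hh => h (by simp [hh])
    have ht : ',' ∉ t := fun hh => h (List.mem_cons_of_mem _ hh)
    simp [pgSplit, hc, ih (cur ++ [c]) ht]

theorem pgSplit_comma (pre : List Char) : ∀ (cur post : List Char), ',' ∉ pre →
    pgSplit cur (pre ++ ',' :: post) = (cur ++ pre) :: pgSplit [] post := by
  induction pre with
  | nil => intro cur post _; simp [pgSplit]
  | cons c t ih =>
    intro cur post h
    have hc : c ≠ ',' := fun hh => h (by simp [hh])
    have ht : ',' ∉ t := fun hh => h (List.mem_cons_of_mem _ hh)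
    simp only [List.cons_append, pgSplit, hc, if_false]
    rw [ih (cur ++ [c]) post ht]
    simp

theorem pgSplit_len_pos (l : List Char) : ∀ cur, 1 ≤ (pgSplit cur l).length := by
  induction l with
  | nil => intro cur; simp [pgSplit]
  | cons c t ih =>
    intro cur
    by_cases hc : c = ','
    · simp [pgSplit, hc]
    · simpa [pgSplit, hc] using ih (cur ++ [c])

theorem pgSplit_len_ge_two (l : List Char) : ∀ cur, ',' ∈ l → 2 ≤ (pgSplit cur l).length := by
  induction l with
  | nil => intro cur h; simp at h
  | cons c t ih =>
    intro cur h
    by_cases hc : c = ','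
    · have := pgSplit_len_pos t []
      simp [pgSplit, hc]; omega
    · have ht : ',' ∈ t := by
        rcases List.mem_cons.mp h with h1 | h1
        · exact absurd h1.symm hc
        · exact h1
      simpa [pgSplit, hc] using ih (cur ++ [c]) ht

theorem find_go_no_comma (l : List Char) : ∀ (k : Nat), ',' ∉ l →
    PySem.Chars.find.go [','] l k = -1 := by
  induction l with
  | nil => intro k _; simp [PySem.Chars.find.go]
  | cons c t ih =>
    intro k h
    have hc : c ≠ ',' := fun hh => h (by simp [hh])
    have ht : ',' ∉ t := fun hh => h (List.mem_cons_of_mem _ hh)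
    have hpre : ([','].isPrefixOf (c :: t)) = false := by
      simp [List.isPrefixOf]
      exact fun hh => absurd hh.symm hc
    simp [PySem.Chars.find.go, hpre, ih (k + 1) ht]

theorem find_go_comma (pre : List Char) : ∀ (post : List Char) (k : Nat), ',' ∉ pre →
    PySem.Chars.find.go [','] (pre ++ ',' :: post) k = (k : Int) + pre.length := by
  induction pre with
  | nil => intro post k _; simp [PySem.Chars.find.go, List.isPrefixOf]
  | cons c t ih =>
    intro post k h
    have hc : c ≠ ',' := fun hh => h (by simp [hh])
    have ht : ',' ∉ t := fun hh => h (List.mem_cons_of_mem _ hh)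
    have hpre : ([','].isPrefixOf (c :: (t ++ ',' :: post))) = false := by
      simp [List.isPrefixOf]
      exact fun hh => absurd hh.symm hc
    simp only [List.cons_append]
    simp only [PySem.Chars.find.go, hpre, Bool.false_eq_true, if_false]
    rw [ih post (k + 1) ht]
    simp only [List.length_cons]
    push_cast
    ring

theorem loopA_eq_all (g : List Char) (cp : Int) (l : List Int) :
    parseGuessLoopA g cp l
      = l.all (fun i => i == cp || PySem.Chars.isalpha (PySem.List.pyGetD g i ' ')) := by
  induction l with
  | nil => simp [parseGuessLoopA]
  | cons i rest ih =>
    by_cases h : i ≠ cp ∧ ¬ (PySem.Chars.isalpha (PySem.List.pyGetD g i ' ') = true)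
    · simp [parseGuessLoopA, h, h.1, h.2]
    · have h' : i = cp ∨ PySem.Chars.isalpha (PySem.List.pyGetD g i ' ') = true := by
        by_cases h1 : i = cp
        · exact Or.inl h1
        · right; by_contra h2; exact h ⟨h1, h2⟩
      rw [parseGuessLoopA, if_neg h, ih]
      rcases h' with h' | h' <;> simp [h']

theorem comma_decomp (cs : List Char) (h : ',' ∈ cs) :
    ∃ pre post, cs = pre ++ ',' :: post ∧ ',' ∉ pre := by
  induction cs with
  | nil => simp at h
  | cons c t ih =>
    by_cases hc : c = ','
    · exact ⟨[], t, by simp [hc], by simp⟩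
    · have ht : ',' ∈ t := by
        rcases List.mem_cons.mp h with h1 | h1
        · exact absurd h1.symm hc
        · exact h1
      obtain ⟨p, q, hpq, hp⟩ := ih ht
      exact ⟨c :: p, q, by simp [hpq], by simp [hp]; exact fun hh => hc hh.symm⟩

theorem drop_succ_append (pre post : List Char) :
    (pre ++ ',' :: post).drop (pre.length + 1) = post := by
  have h : pre ++ ',' :: post = (pre ++ [',']) ++ post := by simp
  have hl : (pre ++ [',']).length = pre.length + 1 := by simp
  rw [h, ← hl, List.drop_left]

theorem range_all_eq (pre post : List Char) :
    ((PySem.List.pyRange 0 (((pre ++ ',' :: post).length : Nat) : Int) 1).all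
      (fun i => i == ((pre.length : Nat) : Int)
        || PySem.Chars.isalpha (PySem.List.pyGetD (pre ++ ',' :: post) i ' ')))
    = (pre.all PySem.Chars.isalpha && post.all PySem.Chars.isalpha) := by
  rw [PySem.List.pyRange_zero_natCast]
  rw [Bool.eq_iff_iff]
  simp only [List.all_map, List.all_eq_true, List.mem_range, Function.comp, Bool.or_eq_true,
    beq_iff_eq, Nat.cast_inj, Bool.and_eq_true]
  constructor
  · intro h
    refine ⟨fun c hc => ?_, fun c hc => ?_⟩
    · obtain ⟨j, hj, rfl⟩ := List.mem_iff_getElem.mp hc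
      have hjlen : j < (pre ++ ',' :: post).length := by simp; omega
      rcases h j hjlen with hk | hk
      · omega
      · rw [PySem.List.pyGetD_eq_getElem _ ' ' (by omega) (by exact_mod_cast hjlen)] at hk
        simp only [Int.toNat_natCast] at hk
        rw [List.getElem_append, dif_pos hj] at hk
        exact hk
    · obtain ⟨j, hj, rfl⟩ := List.mem_iff_getElem.mp hc
      have hjlen : pre.length + 1 + j < (pre ++ ',' :: post).length := by simp; omega
      rcases h (pre.length + 1 + j) hjlen with hk | hk
      · omega
      · rw [PySem.List.pyGetD_eq_getElem _ ' ' (by omega) (by exact_mod_cast hjlen)] at hk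
        simp only [Int.toNat_natCast] at hk
        rw [List.getElem_append, dif_neg (by omega)] at hk
        rw [List.getElem_cons, dif_neg (by omega)] at hk
        simp only [show pre.length + 1 + j - pre.length - 1 = j from by omega] at hk
        exact hk
  · rintro ⟨h1, h2⟩ k hk
    have hklen : k < (pre ++ ',' :: post).length := hk
    by_cases hlt : k < pre.length
    · right
      rw [PySem.List.pyGetD_eq_getElem _ ' ' (by omega) (by exact_mod_cast hklen)]
      simp only [Int.toNat_natCast]
      rw [List.getElem_append, dif_pos hlt]
      exact h1 _ (List.getElem_mem _)
    · by_cases heq : k = pre.length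
      · left; exact heq
      · right
        rw [PySem.List.pyGetD_eq_getElem _ ' ' (by omega) (by exact_mod_cast hklen)]
        simp only [Int.toNat_natCast]
        rw [List.getElem_append, dif_neg hlt]
        rw [List.getElem_cons, dif_neg (by omega)]
        exact h2 _ (List.getElem_mem _)

-- ===== VERDICT (by name: the statement is the Claim_ definition above) =====
theorem parse_guess_spec : Claim_equal_parse_guess := by
  intro guess _
  unfold Spec_parse_guess
  simp only [parse_guess, parse_guess_alt]
  set g := PySem.Str.replace guess " " "" with hg
  clear hg
  have hcomma : (",".toList) = [','] := rfl
  rw [PySem.Str.find_eq, hcomma, PySem.Str.len_eq, splitOn_eq_pgSplit]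
  set cs := g.toList with hcs
  by_cases hmem : ',' ∈ cs
  · obtain ⟨pre, post, hdec, hpre⟩ := comma_decomp cs hmem
    rw [hdec, PySem.Chars.find, find_go_comma pre post 0 hpre]
    simp only [Nat.cast_zero, zero_add]
    have hne : (((pre.length : Int)) == (-1 : Int)) = false := by
      simp [beq_iff_eq]
    simp only [hne, Bool.false_eq_true, if_false]
    rw [pgSplit_comma pre [] post hpre]
    simp only [List.nil_append]
    rw [loopA_eq_all]
    rw [range_all_eq pre post]
    by_cases hpost : ',' ∈ post
    · -- a second comma: A's scan hits a non-alpha char, B's split has ≥ 3 parts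
      have hlen := pgSplit_len_ge_two post [] hpost
      have hl2 : ((pre :: pgSplit [] post).length == 2) = false := by
        simp [beq_iff_eq]; omega
      simp only [hl2, Bool.false_and, Bool.false_eq_true, if_false]
      have hpostall : post.all PySem.Chars.isalpha = false := by
        rw [Bool.eq_false_iff]
        intro hall
        have := List.all_eq_true.mp hall ',' hpost
        simp [PySem.Chars.isalpha, PySem.Chars.isupper, PySem.Chars.islower] at this
      simp only [hpostall, Bool.and_false, Bool.false_eq_true, if_false]
    · rw [pgSplit_no_comma post [] hpost]
      simp only [List.nil_append]
      have hl2 : (((pre :: [post]).length) == 2) = true := by simp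
      simp only [hl2, Bool.true_and, List.getD_cons_succ, List.getD_cons_zero]
      rw [PySem.Chars.strIsalpha, List.all_append]
      by_cases hall : (pre.all PySem.Chars.isalpha && post.all PySem.Chars.isalpha) = true
      · rw [hall, Bool.and_true]
        by_cases hemp : (pre ++ post).isEmpty = true
        · -- the lone-comma case: A returns its (empty) slices, B's isalpha check fails
          have hpe : pre = [] := by
            rcases List.append_eq_nil_iff.mp (List.isEmpty_iff.mp hemp) with ⟨h1, _⟩; exact h1
          have hpo : post = [] := by
            rcases List.append_eq_nil_iff.mp (List.isEmpty_iff.mp hemp) with ⟨_, h2⟩; exact h2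
          subst hpe; subst hpo
          decide
        · have h1 : PySem.List.slice (pre ++ ',' :: post) none (some ((pre.length : Nat) : Int))
              = pre := by
            rw [PySem.List.slice_to_natCast]
            exact List.take_left ..
          have h2 : PySem.List.slice (pre ++ ',' :: post)
              (some (((pre.length : Nat) : Int) + 1)) none = post := by
            have hcast : ((pre.length : Nat) : Int) + 1 = ((pre.length + 1 : Nat) : Int) := by
              push_cast; ring
            rw [hcast, PySem.List.slice_from_natCast]
            exact drop_succ_append pre post
          have hne2 : (!(pre ++ post).isEmpty) = true := by
            simp only [Bool.not_eq_true']
            exact Bool.eq_false_iff.mpr hemp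
          rw [h1, h2, if_pos rfl, hne2, if_pos rfl]
      · have hallf : (pre.all PySem.Chars.isalpha && post.all PySem.Chars.isalpha) = false :=
          Bool.eq_false_iff.mpr hall
        simp only [hallf, Bool.and_false, Bool.false_eq_true, if_false]
  · -- no comma: A returns at find == -1; B's split yields a single part
    rw [PySem.Chars.find, find_go_no_comma cs 0 hmem]
    rw [pgSplit_no_comma cs [] hmem]
    simp
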